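-- pv_equiv track=rewrite | github.com/ezhang7423/learning | usaco/w20bze/photo.py | gimmeAns
-- ===== SOURCE A (Python) =====
-- def gimmeAns(liste):
--     ans = []
--     for x in range(1, liste[0]):
--         current = x
--         pot = [current]
--         nut = current
--         for y in range(len(liste)):
--             nut = liste[y] - nut
--             if y == len(liste) - 1:
--                 pot.append(nut)
--                 ans.append(pot)
--                 break
--             if nut >= liste[y+1]:
--                 break
--
--             else:
--                 pot.append(nut)
--     return ans
-- ===== SOURCE B (Python) =====
-- def gimmeAns(liste):
--     # Each constraint nut_k < liste[k] is affine in the start value x: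
--     # intersect the intervals once, then emit only the valid sequences.
--     lo, hi = 1, liste[0] - 1
--     S, sign = liste[0], -1
--     for k in range(1, len(liste)):
--         lk = liste[k]
--         if sign == -1:
--             lo = max(lo, S - lk + 1)
--         else:
--             hi = min(hi, lk - S - 1)
--         S = lk - S
--         sign = -sign
--     ans = []
--     for x in range(lo, hi + 1):
--         nut = x
--         pot = [x]
--         for l in liste:
--             nut = l - nut
--             pot.append(nut)
--         ans.append(pot)
--     return ans
-- ===== Notes on version B (the rewrite author's own statement) =====
-- stated objective: faster
-- what changed: Instead of simulating the recurrence for every start value x from 1 up to the first element and discarding the failures, B intersects the affine interval constraints (each check nut < liste[k] is S_k +/- x < liste[k]) in one pass to get the exact valid x-range, then emits only the valid sequences.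
import Mathlib
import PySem

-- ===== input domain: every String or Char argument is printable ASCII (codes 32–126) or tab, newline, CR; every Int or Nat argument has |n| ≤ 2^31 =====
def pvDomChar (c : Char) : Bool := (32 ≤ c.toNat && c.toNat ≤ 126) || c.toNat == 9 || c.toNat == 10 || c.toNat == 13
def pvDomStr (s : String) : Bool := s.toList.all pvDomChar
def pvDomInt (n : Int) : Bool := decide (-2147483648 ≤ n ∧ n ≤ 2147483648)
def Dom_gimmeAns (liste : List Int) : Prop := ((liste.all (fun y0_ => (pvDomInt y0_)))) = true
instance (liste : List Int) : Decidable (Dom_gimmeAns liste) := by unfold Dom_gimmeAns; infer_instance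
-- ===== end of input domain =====

-- B changes the algorithm: A tries every start value x from 1 up to the first element and simulates the
-- recurrence until a constraint fails (O(first*n)); B intersects the affine interval constraints
-- once to get the valid x-range and emits only the valid sequences (O(n + valid*n)). Faster (asymptotic).

-- ===== PORT A =====
-- A's inner 'for y in range(len(liste))' loop: the first element of the list is the current liste[y],
-- `rest` holds liste[y+1:]; pot/nut are the loop state, `none` = the loop broke without appending.
def gimmeAnsInner (l : Int) (rest : List Int) (nut : Int) (pot : List Int) : Option (List Int) :=
  let nut' := l - nut
  match rest with
  | [] => some (pot ++ [nut'])
  | r :: rs => if nut' ≥ r then none else gimmeAnsInner r rs nut' (pot ++ [nut'])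

-- the outer loop body: 'ans.append(pot)' happens exactly when the inner loop reached the last index
def gimmeAnsStep (l0 : Int) (rest : List Int) (ans : List (List Int)) (x : Int) : List (List Int) :=
  match gimmeAnsInner l0 rest x [x] with
  | some pot => ans ++ [pot]
  | none => ans

def gimmeAns (liste : List Int) : List (List Int) :=
  match liste with
  | [] => []   -- Python raises IndexError reading the first element; excluded by Pre_gimmeAns
  | l0 :: rest => (PySem.List.pyRange 1 l0 1).foldl (gimmeAnsStep l0 rest) []

-- ===== PORT B =====
-- B's first loop: fold the affine constraints over liste[1:], state (lo, hi, S, sign).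
def gimmeAnsBounds : List Int → Int × Int × Int × Int → Int × Int × Int × Int
  | [], st => st
  | lk :: rs, (lo, hi, S, sign) =>
    if sign = -1 then gimmeAnsBounds rs (max lo (S - lk + 1), hi, lk - S, -sign)
    else gimmeAnsBounds rs (lo, min hi (lk - S - 1), lk - S, -sign)

-- B's inner sequence builder: pot = [x]; for l in liste: nut = l - nut; pot.append(nut)
def gimmeAnsBuild (liste : List Int) (x : Int) : List Int :=
  (liste.foldl (fun (st : Int × List Int) l => (l - st.1, st.2 ++ [l - st.1])) (x, [x])).2

def gimmeAns_alt (liste : List Int) : List (List Int) :=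
  match liste with
  | [] => []   -- Python raises IndexError reading the first element; excluded by Pre_gimmeAns
  | l0 :: rest =>
    match gimmeAnsBounds rest (1, l0 - 1, l0, -1) with
    | (lo, hi, _, _) =>
      (PySem.List.pyRange lo (hi + 1) 1).map (gimmeAnsBuild (l0 :: rest))

-- ===== PRECONDITION & SPEC =====
-- Pre_ excludes only the empty list, on which Python's first-element access raises IndexError.
def Pre_gimmeAns (liste : List Int) : Prop := liste ≠ []
instance (liste : List Int) : Decidable (Pre_gimmeAns liste) := by unfold Pre_gimmeAns; infer_instance
def pvWitness_gimmeAns : List Int := ([4, 6, 5])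

def Spec_gimmeAns (liste : List Int) (out : List (List Int)) : Prop := out = gimmeAns_alt liste
instance (liste : List Int) (out : List (List Int)) : Decidable (Spec_gimmeAns liste out) := by unfold Spec_gimmeAns; infer_instance

-- ===== CLAIM (what is proved, stated in full; the proofs are below) =====
def Claim_equal_gimmeAns : Prop := ∀ (liste : List Int), Dom_gimmeAns liste → Pre_gimmeAns liste → Spec_gimmeAns liste (gimmeAns liste)

-- ===== LEMMAS AND PROOFS =====

-- the chain nut_{k+1} = l_k - nut_k emitted by the recurrence, starting AFTER the seed value
def pvChain : List Int → Int → List Int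
  | [], _ => []
  | l :: ls, nut => (l - nut) :: pvChain ls (l - nut)

-- A's acceptance condition for the tail constraints: every produced value stays below the next element
def pvCond : List Int → Int → Bool
  | [], _ => true
  | r :: rs, nut => (nut < r) && pvCond rs (r - nut)

theorem pvInner_eq (rest : List Int) : ∀ (l nut : Int) (pot : List Int),
    gimmeAnsInner l rest nut pot =
      if pvCond rest (l - nut) then some (pot ++ (l - nut) :: pvChain rest (l - nut)) else none := by
  induction rest with
  | nil => intro l nut pot; simp [gimmeAnsInner, pvCond, pvChain]
  | cons r rs ih =>
    intro l nut pot
    simp only [gimmeAnsInner, pvCond, pvChain]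
    by_cases h : l - nut ≥ r
    · simp [h, show ¬ (l - nut < r) by omega]
    · simp only [if_neg h, ih, show (l - nut < r) = true by simp; omega]
      split <;> simp_all

theorem pvBuild_eq (liste : List Int) : ∀ (nut : Int) (pot : List Int),
    (liste.foldl (fun (st : Int × List Int) l => (l - st.1, st.2 ++ [l - st.1])) (nut, pot)) =
      ((liste.foldl (fun (st : Int × List Int) l => (l - st.1, st.2 ++ [l - st.1])) (nut, pot)).1,
       pot ++ pvChain liste nut) := by
  induction liste with
  | nil => intro nut pot; simp [pvChain]
  | cons l ls ih =>
    intro nut pot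
    simp only [List.foldl_cons]
    rw [ih (l - nut) (pot ++ [l - nut])]
    simp [pvChain]

theorem pvBuild_chain (l0 : Int) (rest : List Int) (x : Int) :
    gimmeAnsBuild (l0 :: rest) x = x :: (l0 - x) :: pvChain rest (l0 - x) := by
  unfold gimmeAnsBuild
  rw [pvBuild_eq]
  simp [pvChain]

-- the interval computed by B characterises exactly the x accepted by A's constraints
theorem pvBounds_char (rest : List Int) : ∀ (lo hi S sgn x : Int), (sgn = 1 ∨ sgn = -1) →
    (((gimmeAnsBounds rest (lo, hi, S, sgn)).1 ≤ x ∧ x ≤ (gimmeAnsBounds rest (lo, hi, S, sgn)).2.1) ↔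
      (lo ≤ x ∧ x ≤ hi ∧ pvCond rest (S + sgn * x) = true)) := by
  induction rest with
  | nil => intro lo hi S sgn x _; simp [gimmeAnsBounds, pvCond]
  | cons r rs ih =>
    intro lo hi S sgn x hs
    rcases hs with h1 | h1 <;> subst h1
    · simp only [gimmeAnsBounds, pvCond]
      rw [if_neg (by norm_num : ¬ (1 : Int) = -1)]
      rw [show (-(1:Int)) = -1 by norm_num]
      rw [ih lo (min hi (r - S - 1)) (r - S) (-1) x (Or.inr rfl)]
      rw [show r - (S + 1 * x) = (r - S) + (-1) * x by ring]
      simp only [Bool.and_eq_true, decide_eq_true_eq]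
      constructor
      · rintro ⟨a, b, c⟩; refine ⟨a, by omega, by omega, c⟩
      · rintro ⟨a, b, c, d⟩; exact ⟨a, by omega, d⟩
    · simp only [gimmeAnsBounds, pvCond]
      simp only [if_true]
      rw [show (- -1 : Int) = 1 by norm_num]
      rw [ih (max lo (S - r + 1)) hi (r - S) 1 x (Or.inl rfl)]
      rw [show r - (S + (-1) * x) = (r - S) + 1 * x by ring]
      simp only [Bool.and_eq_true, decide_eq_true_eq]
      constructor
      · rintro ⟨a, b, c⟩; refine ⟨by omega, b, by omega, c⟩
      · rintro ⟨a, b, c, d⟩; exact ⟨by omega, b, d⟩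

theorem pvStep_foldl (l0 : Int) (rest : List Int) (xs : List Int) : ∀ (acc : List (List Int)),
    xs.foldl (gimmeAnsStep l0 rest) acc
      = acc ++ (xs.filter (fun x => pvCond rest (l0 - x))).map (gimmeAnsBuild (l0 :: rest)) := by
  induction xs with
  | nil => intro acc; simp
  | cons x xs ih =>
    intro acc
    simp only [List.foldl_cons, List.filter_cons]
    by_cases h : pvCond rest (l0 - x) = true
    · rw [show gimmeAnsStep l0 rest acc x = acc ++ [gimmeAnsBuild (l0 :: rest) x] from by
        unfold gimmeAnsStep; rw [pvInner_eq, if_pos h, pvBuild_chain]; rfl]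
      simp [h, ih]
    · rw [show gimmeAnsStep l0 rest acc x = acc from by
        unfold gimmeAnsStep; rw [pvInner_eq, if_neg h]]
      simp [h, ih]

-- two strictly increasing lists with the same members are equal
theorem pvSorted_ext (xs ys : List Int) (hx : xs.Pairwise (· < ·)) (hy : ys.Pairwise (· < ·))
    (h : ∀ a, a ∈ xs ↔ a ∈ ys) : xs = ys := by
  have hperm : xs.Perm ys := by
    rw [List.perm_ext_iff_of_nodup (hx.imp ne_of_lt) (hy.imp ne_of_lt)]
    exact h
  exact hperm.eq_of_pairwise (fun a b _ _ h1 h2 => absurd h2 (lt_asymm h1)) hx hy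

theorem pvFilter_range (l0 : Int) (rest : List Int) :
    (PySem.List.pyRange 1 l0 1).filter (fun x => pvCond rest (l0 - x)) =
      PySem.List.pyRange (gimmeAnsBounds rest (1, l0 - 1, l0, -1)).1
        ((gimmeAnsBounds rest (1, l0 - 1, l0, -1)).2.1 + 1) 1 := by
  apply pvSorted_ext
  · exact (PySem.List.pairwise_lt_pyRange_one 1 l0).filter _
  · exact PySem.List.pairwise_lt_pyRange_one _ _
  · intro a
    have hchar := pvBounds_char rest 1 (l0 - 1) l0 (-1) a (Or.inr rfl)
    rw [show l0 + (-1) * a = l0 - a by ring] at hchar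
    simp only [List.mem_filter, PySem.List.mem_pyRange_one]
    constructor
    · rintro ⟨⟨h1, h2⟩, h3⟩
      have := hchar.mpr ⟨h1, by omega, h3⟩
      omega
    · rintro ⟨h1, h2⟩
      have := hchar.mp ⟨h1, by omega⟩
      exact ⟨⟨this.1, by omega⟩, this.2.2⟩

-- ===== VERDICT (by name: the statement is the Claim_ definition above) =====
theorem gimmeAns_spec : Claim_equal_gimmeAns := by
  intro liste _ hpre
  unfold Spec_gimmeAns
  match liste with
  | [] => exact absurd rfl hpre
  | l0 :: rest =>
    simp only [gimmeAns, gimmeAns_alt]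
    rw [pvStep_foldl, pvFilter_range]
    rfl
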